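-- pv_equiv track=rewrite | github.com/gopallanda/DSA | HackerEarth/hidden_tressure.py | solve
-- ===== SOURCE A (Python) =====
-- from collections import defaultdict
--
-- def solve (n, nums):
--     mydict=defaultdict(list)
--     res=0
--     for num in nums:
--         digit_sum=getDigitSum(num)
--         mydict[digit_sum].append(num)
--
--     for value in mydict.values():
--         k = len(value)
--         res += k * (k - 1) // 2
--
--     return res
--
-- def getDigitSum(num):
--     r=0
--     total=0
--     while num>0:
--         r=num%10
--         total=total+r
--         num=num//10
--     return total
-- ===== SOURCE B (Python) =====
-- def solve(n, nums):
--     counts = {}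
--     res = 0
--     for num in nums:
--         ds = getDigitSum(num)
--         c = counts.get(ds, 0)
--         res += c
--         counts[ds] = c + 1
--     return res
--
-- def getDigitSum(num):
--     r=0
--     total=0
--     while num>0:
--         r=num%10
--         total=total+r
--         num=num//10
--     return total
-- ===== Notes on version B (the rewrite author's own statement) =====
-- stated objective: alternative
-- what changed: Replaced the two-pass build-groups-then-sum-C(k,2) structure (dict of per-digit-sum lists, then a second loop over the groups) with a single pass that keeps only a count per digit sum and adds the number of previously seen equal-sum elements for each element; no per-group lists are built, so memory drops from O(n) list storage to O(#distinct digit sums) counters.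
import Mathlib
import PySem

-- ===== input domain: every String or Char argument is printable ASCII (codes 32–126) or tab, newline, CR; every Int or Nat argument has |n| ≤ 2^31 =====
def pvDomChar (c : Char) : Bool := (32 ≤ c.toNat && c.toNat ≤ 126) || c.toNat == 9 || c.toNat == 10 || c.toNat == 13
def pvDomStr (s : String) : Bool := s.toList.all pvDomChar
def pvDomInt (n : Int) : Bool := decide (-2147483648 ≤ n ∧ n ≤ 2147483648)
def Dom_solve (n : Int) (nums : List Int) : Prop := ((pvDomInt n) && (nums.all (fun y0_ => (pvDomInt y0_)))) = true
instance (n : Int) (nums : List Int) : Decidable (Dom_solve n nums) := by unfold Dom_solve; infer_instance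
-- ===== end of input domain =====

-- B replaces A's two-pass structure (group the numbers into per-digit-sum lists, then sum
-- k*(k-1)//2 over the groups) with a single pass that keeps only a counter per digit sum and,
-- for each number, adds the count of previously seen equal-sum numbers (objective: alternative).

-- ===== PORT A =====
-- shared helper: Python's getDigitSum (while num > 0: total += num % 10; num //= 10)
def getDigitSumGo (num : Int) (r total : Int) : Int :=
  if num > 0 then
    getDigitSumGo (PySem.Int.floordiv num 10) (PySem.Int.mod num 10) (total + PySem.Int.mod num 10)
  else total
termination_by num.toNat
decreasing_by
  have h2 : PySem.Int.floordiv num 10 = num / 10 := PySem.Int.floordiv_eq_ediv_of_pos (by omega)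
  rename_i h
  rw [h2]; omega

def getDigitSum (num : Int) : Int := getDigitSumGo num 0 0

def solve (n : Int) (nums : List Int) : Int :=
  let mydict := nums.foldl
    (fun d num =>
      let ds := getDigitSum num
      d.insert ds (d.getD ds [] ++ [num]))
    (PySem.Dict.empty : PySem.Dict Int (List Int))
  mydict.values.foldl
    (fun res value =>
      let k : Int := value.length
      res + PySem.Int.floordiv (k * (k - 1)) 2) 0

-- ===== PORT B =====
def solve_alt (n : Int) (nums : List Int) : Int :=
  (nums.foldl
    (fun (st : PySem.Dict Int Int × Int) num =>
      let ds := getDigitSum num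
      let c := st.1.getD ds 0
      (st.1.insert ds (c + 1), st.2 + c))
    ((PySem.Dict.empty : PySem.Dict Int Int), 0)).2

-- ===== PRECONDITION & SPEC =====
def Spec_solve (n : Int) (nums : List Int) (out : Int) : Prop := out = solve_alt n nums
instance (n : Int) (nums : List Int) (out : Int) : Decidable (Spec_solve n nums out) := by unfold Spec_solve; infer_instance

-- ===== CLAIM (what is proved, stated in full; the proofs are below) =====
def Claim_equal_solve : Prop := ∀ (n : Int) (nums : List Int), Dom_solve n nums → Spec_solve n nums (solve n nums)

-- ===== LEMMAS AND PROOFS =====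
-- number of unordered pairs inside one group: |l| * (|l| - 1) // 2
def pairsOf (l : List Int) : Int :=
  PySem.Int.floordiv ((l.length : Int) * ((l.length : Int) - 1)) 2

-- A's final result, read off the grouping dict's items
def sumC (items : List (Int × List Int)) : Int := (items.map (fun p => pairsOf p.2)).sum

lemma pairsOf_nat (l : List Int) : pairsOf l = ((l.length * (l.length - 1) / 2 : Nat) : Int) := by
  unfold pairsOf
  rcases l with _ | ⟨x, t⟩
  · simp [PySem.Int.floordiv]
  · have h : ((x :: t).length : Int) * (((x :: t).length : Int) - 1)
        = (((x :: t).length * ((x :: t).length - 1) : Nat) : Int) := by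
      simp only [List.length_cons, Nat.add_sub_cancel]
      push_cast; ring
    rw [h]
    exact_mod_cast PySem.Int.floordiv_natCast ((x :: t).length * ((x :: t).length - 1)) 2

lemma pairsOf_append (l : List Int) (x : Int) :
    pairsOf (l ++ [x]) = pairsOf l + l.length := by
  rw [pairsOf_nat, pairsOf_nat]
  have : (l ++ [x]).length = l.length + 1 := by simp
  rw [this]
  have key : (l.length + 1) * (l.length + 1 - 1) / 2 = l.length * (l.length - 1) / 2 + l.length := by
    rcases Nat.eq_zero_or_pos l.length with h | h
    · simp [h]
    · have e : (l.length + 1) * (l.length + 1 - 1) = l.length * (l.length - 1) + l.length * 2 := by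
        rcases Nat.exists_eq_add_of_le h with ⟨m, hm⟩
        rw [hm]
        simp only [Nat.succ_eq_add_one, Nat.add_sub_cancel]
        have h1 : 1 + m - 1 = m := by omega
        rw [h1]; ring
      rw [e, Nat.add_mul_div_right _ _ (by omega : 0 < 2)]
  rw [key]; push_cast; ring

lemma sumC_cons (p : Int × List Int) (t : List (Int × List Int)) :
    sumC (p :: t) = pairsOf p.2 + sumC t := by simp [sumC]

lemma sumC_append_single (l : List (Int × List Int)) (p : Int × List Int) :
    sumC (l ++ [p]) = sumC l + pairsOf p.2 := by simp [sumC]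

lemma pairsOf_single (x : Int) : pairsOf [x] = 0 := by
  rw [pairsOf_nat]; simp

-- replacing the single entry keyed k by (k, w) changes the sum by pairsOf w - pairsOf v
lemma sumC_replace (l : List (Int × List Int)) (k : Int) (v w : List Int)
    (hnd : (l.map Prod.fst).Nodup) (hmem : (k, v) ∈ l) :
    sumC (l.map (fun p => if p.1 == k then (k, w) else p))
      = sumC l - pairsOf v + pairsOf w := by
  induction l with
  | nil => simp at hmem
  | cons p t ih =>
    simp only [List.map_cons, List.nodup_cons] at hnd
    rcases List.mem_cons.mp hmem with h | h
    · subst h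
      have htid : t.map (fun p => if p.1 == k then (k, w) else p) = t := by
        have hcong : ∀ q ∈ t, (if q.1 == k then (k, w) else q) = q := by
          intro q hq
          have hmm : q.1 ∈ List.map Prod.fst t := List.mem_map_of_mem (f := Prod.fst) hq
          have hq1 : q.1 ≠ k := fun he => hnd.1 (he ▸ hmm)
          simp [hq1]
        simpa using List.map_congr_left hcong
      simp only [List.map_cons, htid]
      rw [sumC_cons, sumC_cons]
      simp
      ring
    · have hk : k ∈ t.map Prod.fst := by
        have := List.mem_map_of_mem (f := Prod.fst) h
        simpa using this
      have hne : p.1 ≠ k := fun he => hnd.1 (he ▸ hk)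
      simp only [List.map_cons]
      rw [sumC_cons, sumC_cons, ih hnd.2 h]
      simp [hne]
      ring

-- one step of A's grouping loop raises sumC by the size of the touched group
lemma sumC_insert_append (d : PySem.Dict Int (List Int)) (ds : Int) (x : Int)
    (hnd : d.keys.Nodup) :
    sumC ((d.insert ds (d.getD ds [] ++ [x])).items)
      = sumC d.items + ((d.getD ds []).length : Int) := by
  by_cases hc : d.contains ds = true
  · obtain ⟨v, hv⟩ : ∃ v, d.get? ds = some v := by
      have := PySem.Dict.contains_eq_isSome_get? d ds
      rw [hc] at this
      exact Option.isSome_iff_exists.mp this.symm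
    have hgetD : d.getD ds [] = v := PySem.Dict.getD_of_get?_eq_some d [] hv
    have hmem : (ds, v) ∈ d.items := PySem.Dict.mem_items_of_get?_eq_some d hv
    have hndf : (d.items.map Prod.fst).Nodup := by
      simpa [PySem.Dict.keys] using hnd
    rw [PySem.Dict.items_insert_of_contains (h := hc), hgetD,
        sumC_replace d.items ds v (v ++ [x]) hndf hmem, pairsOf_append]
    ring
  · rw [PySem.Dict.items_insert_of_not_contains (h := by simpa using hc),
        sumC_append_single,
        PySem.Dict.getD_of_not_contains (h := by simpa using hc)]
    simp [pairsOf_single]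

-- the joint invariant: B's running counter holds the lengths of A's groups, so B's running
-- result tracks sumC of A's evolving dict
lemma key_invariant : ∀ (xs : List Int) (d : PySem.Dict Int (List Int)) (c : PySem.Dict Int Int) (r : Int),
    d.keys.Nodup →
    (∀ k, c.getD k 0 = ((d.getD k []).length : Int)) →
    (xs.foldl
      (fun (st : PySem.Dict Int Int × Int) num =>
        let ds := getDigitSum num
        let cc := st.1.getD ds 0
        (st.1.insert ds (cc + 1), st.2 + cc)) (c, r)).2
    = r + sumC ((xs.foldl
        (fun d num =>
          let ds := getDigitSum num
          d.insert ds (d.getD ds [] ++ [num])) d).items) - sumC d.items := by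
  intro xs
  induction xs with
  | nil => intro d c r hnd hinv; simp
  | cons x t ih =>
    intro d c r hnd hinv
    simp only [List.foldl_cons]
    set ds := getDigitSum x with hds
    have hnd' : (d.insert ds (d.getD ds [] ++ [x])).keys.Nodup :=
      PySem.Dict.nodup_keys_insert _ _ _ hnd
    have hinv' : ∀ k, (c.insert ds (c.getD ds 0 + 1)).getD k 0
        = (((d.insert ds (d.getD ds [] ++ [x])).getD k []).length : Int) := by
      intro k
      rw [PySem.Dict.getD_insert, PySem.Dict.getD_insert]
      by_cases hk : k = ds
      · simp [hk, hinv ds]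
      · simp [hk, hinv k]
    rw [ih (d.insert ds (d.getD ds [] ++ [x])) (c.insert ds (c.getD ds 0 + 1)) (r + c.getD ds 0) hnd' hinv',
        sumC_insert_append d ds x hnd, hinv ds]
    ring

-- ===== VERDICT (by name: the statement is the Claim_ definition above) =====
theorem solve_spec : Claim_equal_solve := by
  intro n nums _
  unfold Spec_solve solve solve_alt
  have hkey := key_invariant nums PySem.Dict.empty PySem.Dict.empty 0
    (by simp [PySem.Dict.keys, PySem.Dict.empty])
    (by intro k; simp [PySem.Dict.getD_empty])
  rw [hkey]
  have hA : ∀ (d : PySem.Dict Int (List Int)),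
      d.values.foldl (fun res value => let k : Int := value.length; res + PySem.Int.floordiv (k * (k - 1)) 2) 0
        = sumC d.items := by
    intro d
    have := PySem.List.foldl_add (g := fun (value : List Int) => pairsOf value) (l := d.values) (a := 0)
    simp only [pairsOf] at this
    rw [this]
    simp [sumC, PySem.Dict.values, List.map_map, pairsOf, Function.comp_def]
  rw [hA]
  simp [sumC, PySem.Dict.empty]
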